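-- pv_equiv track=rewrite | github.com/maxslimmer/advent-of-code-2019 | day03/script.py | get_nodes_from_vector
-- ===== SOURCE A (Python) =====
-- def get_nodes_from_vector(vector, start_node=(0, 0)):
--     nodes = []
--     x, y = start_node
--     direction, mag = vector[0], int(vector[1:])
--     for _ in range(mag):
--
--         if direction == "R":
--             x += 1
--         elif direction == "L":
--             x -= 1
--         elif direction == "U":
--             y += 1
--         elif direction == "D":
--             y -= 1
--
--         nodes.append((x, y))
--     return nodes
-- ===== SOURCE B (Python) =====
-- def get_nodes_from_vector(vector, start_node=(0, 0)):
--     direction, mag = vector[0], int(vector[1:])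
--     dx, dy = {"R": (1, 0), "L": (-1, 0), "U": (0, 1), "D": (0, -1)}.get(direction, (0, 0))
--     x, y = start_node
--     return [(x + dx * i, y + dy * i) for i in range(1, mag + 1)]
-- ===== Notes on version B (the rewrite author's own statement) =====
-- stated objective: simpler
-- what changed: B maps the direction character to a fixed (dx,dy) delta once and produces each node by the closed-form expression (x+dx*i, y+dy*i) over range(1, mag+1), instead of A's per-step branch and running-coordinate accumulator loop.
import Mathlib
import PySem

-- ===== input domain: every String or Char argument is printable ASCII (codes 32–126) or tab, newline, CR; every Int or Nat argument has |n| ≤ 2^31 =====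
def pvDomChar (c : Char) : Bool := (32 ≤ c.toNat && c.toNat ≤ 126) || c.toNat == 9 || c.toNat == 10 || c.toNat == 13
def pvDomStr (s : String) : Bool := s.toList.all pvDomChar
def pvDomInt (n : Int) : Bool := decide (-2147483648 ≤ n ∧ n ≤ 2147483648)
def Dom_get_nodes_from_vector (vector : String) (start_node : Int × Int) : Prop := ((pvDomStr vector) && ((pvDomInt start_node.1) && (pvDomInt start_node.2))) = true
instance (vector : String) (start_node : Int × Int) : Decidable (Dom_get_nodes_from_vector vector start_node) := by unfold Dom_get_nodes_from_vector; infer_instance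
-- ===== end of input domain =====

-- B replaces A's per-step direction branch and running coordinate with a direction→delta
-- table looked up once and a closed-form node expression (simpler decomposition).

-- ===== PORT A =====
-- literal port: x, y run; each range(mag) step branches on direction and appends (x, y)
def get_nodes_from_vector (vector : String) (start_node : Int × Int) : List (Int × Int) :=
  match PySem.Str.pyGet? vector 0, PySem.Int.ofStr? (PySem.Str.slice vector (some 1) none) with
  | some direction, some mag =>
    ((PySem.List.pyRange 0 mag 1).foldl
        (fun (st : Int × Int × List (Int × Int)) _ =>
          let x := st.1
          let y := st.2.1
          let nodes := st.2.2
          let xy : Int × Int :=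
            if direction = 'R' then (x + 1, y)
            else if direction = 'L' then (x - 1, y)
            else if direction = 'U' then (x, y + 1)
            else if direction = 'D' then (x, y - 1)
            else (x, y)
          (xy.1, xy.2, nodes ++ [(xy.1, xy.2)]))
        (start_node.1, start_node.2, [])).2.2
  | _, _ => []   -- unreachable under Pre_ (IndexError / ValueError)

-- ===== PORT B =====
-- literal port of Source B: delta looked up once, nodes by closed form over range(1, mag+1)
def get_nodes_from_vector_alt (vector : String) (start_node : Int × Int) : List (Int × Int) :=
  match PySem.Str.pyGet? vector 0 with
  | none => []   -- unreachable under Pre_ (IndexError, as in A)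
  | some direction =>
  match PySem.Int.ofStr? (PySem.Str.slice vector (some 1) none) with
  | none => []   -- unreachable under Pre_ (ValueError, as in A)
  | some mag =>
    let delta : Int × Int :=
      (PySem.Dict.mk [('R', ((1 : Int), (0 : Int))), ('L', (-1, 0)), ('U', (0, 1)), ('D', (0, -1))]).getD
        direction (0, 0)
    (PySem.List.pyRange 1 (mag + 1) 1).map
      (fun i => (start_node.1 + delta.1 * i, start_node.2 + delta.2 * i))

-- ===== PRECONDITION & SPEC =====
-- Pre_ excludes exactly the inputs where A raises: the empty string (IndexError on
-- vector[0]) and strings whose tail is not a valid int literal (ValueError); B raises there too.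
def Pre_get_nodes_from_vector (vector : String) (start_node : Int × Int) : Prop :=
  (PySem.Str.pyGet? vector 0).isSome = true ∧
  (PySem.Int.ofStr? (PySem.Str.slice vector (some 1) none)).isSome = true
instance (vector : String) (start_node : Int × Int) : Decidable (Pre_get_nodes_from_vector vector start_node) := by unfold Pre_get_nodes_from_vector; infer_instance

def pvWitness_get_nodes_from_vector : String × (Int × Int) := ("R3", (0, 0))

def Spec_get_nodes_from_vector (vector : String) (start_node : Int × Int) (out : List (Int × Int)) : Prop := out = get_nodes_from_vector_alt vector start_node
instance (vector : String) (start_node : Int × Int) (out : List (Int × Int)) : Decidable (Spec_get_nodes_from_vector vector start_node out) := by unfold Spec_get_nodes_from_vector; infer_instance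

-- ===== CLAIM (what is proved, stated in full; the proofs are below) =====
def Claim_equal_get_nodes_from_vector : Prop := ∀ (vector : String) (start_node : Int × Int), Dom_get_nodes_from_vector vector start_node → Pre_get_nodes_from_vector vector start_node → Spec_get_nodes_from_vector vector start_node (get_nodes_from_vector vector start_node)

-- ===== LEMMAS AND PROOFS =====

-- A's accumulator loop with a fixed per-step delta, characterised in closed form
theorem pv_fold_range (dx dy : Int) (n : Nat) (x y : Int) (acc : List (Int × Int)) :
    (List.range n).foldl
      (fun (st : Int × Int × List (Int × Int)) _ =>
        (st.1 + dx, st.2.1 + dy, st.2.2 ++ [(st.1 + dx, st.2.1 + dy)]))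
      (x, y, acc)
    = (x + dx * n, y + dy * n,
       acc ++ (List.range n).map (fun k : Nat => (x + dx * ((k : Int) + 1), y + dy * ((k : Int) + 1)))) := by
  induction n generalizing acc with
  | zero => simp
  | succ m ih =>
    rw [List.range_succ, List.foldl_append, ih]
    simp only [List.foldl_cons, List.foldl_nil, List.map_append, List.map_cons, List.map_nil,
      List.append_assoc, Prod.mk.injEq, List.append_cancel_left_eq, List.cons.injEq, and_true]
    push_cast
    refine ⟨by ring, by ring, by ring, by ring⟩

-- the same loop over range(mag) equals B's map over range(1, mag+1)
theorem pv_fold_pyRange (dx dy : Int) (mag x y : Int) :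
    ((PySem.List.pyRange 0 mag 1).foldl
      (fun (st : Int × Int × List (Int × Int)) _ =>
        (st.1 + dx, st.2.1 + dy, st.2.2 ++ [(st.1 + dx, st.2.1 + dy)]))
      (x, y, ([] : List (Int × Int)))).2.2
    = (PySem.List.pyRange 1 (mag + 1) 1).map (fun i => (x + dx * i, y + dy * i)) := by
  rw [PySem.List.pyRange_one 0 mag, PySem.List.pyRange_one 1 (mag + 1), List.foldl_map,
    List.map_map]
  have h1 : (fun (st : Int × Int × List (Int × Int)) (k : Nat) =>
      (fun (st : Int × Int × List (Int × Int)) (_ : Int) =>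
        (st.1 + dx, st.2.1 + dy, st.2.2 ++ [(st.1 + dx, st.2.1 + dy)])) st ((0 : Int) + (k : Int)))
      = (fun (st : Int × Int × List (Int × Int)) (_ : Nat) =>
        (st.1 + dx, st.2.1 + dy, st.2.2 ++ [(st.1 + dx, st.2.1 + dy)])) := rfl
  rw [h1, show (mag - 0).toNat = (mag + 1 - 1).toNat by omega, pv_fold_range]
  simp only [List.nil_append, List.map_map]
  apply List.map_congr_left
  intro k _
  simp only [Function.comp_apply]
  refine Prod.ext (by push_cast; ring) (by push_cast; ring)

-- B's delta table agrees with A's if/elif chain: one (dx, dy) per direction character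
theorem pv_delta (direction : Char) :
    ∃ dx dy : Int,
      (PySem.Dict.mk [('R', ((1 : Int), (0 : Int))), ('L', (-1, 0)), ('U', (0, 1)), ('D', (0, -1))]).getD direction (0, 0) = (dx, dy) ∧
      ∀ a b : Int,
        (if direction = 'R' then (a + 1, b)
         else if direction = 'L' then (a - 1, b)
         else if direction = 'U' then (a, b + 1)
         else if direction = 'D' then (a, b - 1)
         else (a, b)) = (a + dx, b + dy) := by
  by_cases hR : direction = 'R'
  · exact ⟨1, 0, by subst hR; decide, fun a b => by subst hR; simp⟩
  by_cases hL : direction = 'L'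
  · refine ⟨-1, 0, by subst hL; decide, fun a b => ?_⟩
    subst hL; simp [hR, Prod.ext_iff]; ring
  by_cases hU : direction = 'U'
  · exact ⟨0, 1, by subst hU; decide, fun a b => by subst hU; simp [hR, hL]⟩
  by_cases hD : direction = 'D'
  · refine ⟨0, -1, by subst hD; decide, fun a b => ?_⟩
    subst hD; simp [hR, hL, hU, Prod.ext_iff]; ring
  · refine ⟨0, 0, ?_, fun a b => by simp [hR, hL, hU, hD]⟩
    simp [PySem.Dict.getD, PySem.Dict.get?, List.find?,
      beq_eq_false_iff_ne.mpr (Ne.symm hR), beq_eq_false_iff_ne.mpr (Ne.symm hL),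
      beq_eq_false_iff_ne.mpr (Ne.symm hU), beq_eq_false_iff_ne.mpr (Ne.symm hD)]

-- ===== VERDICT (by name: the statement is the Claim_ definition above) =====
theorem get_nodes_from_vector_spec : Claim_equal_get_nodes_from_vector := by
  intro vector start_node _ hpre
  obtain ⟨h1, h2⟩ := hpre
  unfold Spec_get_nodes_from_vector get_nodes_from_vector get_nodes_from_vector_alt
  obtain ⟨direction, hdir⟩ := Option.isSome_iff_exists.mp h1
  obtain ⟨mag, hmag⟩ := Option.isSome_iff_exists.mp h2
  rw [hdir, hmag]
  obtain ⟨dx, dy, hd, hstep⟩ := pv_delta direction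
  have hfold :
      (fun (st : Int × Int × List (Int × Int)) (_ : Int) =>
        let x := st.1
        let y := st.2.1
        let nodes := st.2.2
        let xy : Int × Int :=
          if direction = 'R' then (x + 1, y)
          else if direction = 'L' then (x - 1, y)
          else if direction = 'U' then (x, y + 1)
          else if direction = 'D' then (x, y - 1)
          else (x, y)
        (xy.1, xy.2, nodes ++ [(xy.1, xy.2)]))
      = (fun (st : Int × Int × List (Int × Int)) (_ : Int) =>
          (st.1 + dx, st.2.1 + dy, st.2.2 ++ [(st.1 + dx, st.2.1 + dy)])) := by
    funext st i
    simp only [hstep st.1 st.2.1]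
  simp only [hfold, hd]
  exact pv_fold_pyRange dx dy mag start_node.1 start_node.2
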